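-- pv_equiv track=rewrite | github.com/oiovoyo/projecteuler | problem0037/37.py | is_number_ok
-- ===== SOURCE A (Python) =====
-- def is_number_ok(num):
-- 	check="0468"
-- 	sum = 0
-- 	if num == 2 or num == 5:
-- 		return True
-- 	for i in check:
-- 		#sum  = sum + int(i)
-- 		if str(num).find(i) != -1:
-- 			return False
-- 	return True
-- ===== SOURCE B (Python) =====
-- def is_number_ok(num):
--     if num == 2 or num == 5:
--         return True
--     forbidden = frozenset("0468")
--     for ch in str(num):
--         if ch in forbidden:
--             return False
--     return True
-- ===== Notes on version B (the rewrite author's own statement) =====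
-- stated objective: simpler
-- what changed: Replaces A's four substring .find scans (one per forbidden digit) with a single pass over the digits of str(num) testing membership in a fixed forbidden set.
import Mathlib
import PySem

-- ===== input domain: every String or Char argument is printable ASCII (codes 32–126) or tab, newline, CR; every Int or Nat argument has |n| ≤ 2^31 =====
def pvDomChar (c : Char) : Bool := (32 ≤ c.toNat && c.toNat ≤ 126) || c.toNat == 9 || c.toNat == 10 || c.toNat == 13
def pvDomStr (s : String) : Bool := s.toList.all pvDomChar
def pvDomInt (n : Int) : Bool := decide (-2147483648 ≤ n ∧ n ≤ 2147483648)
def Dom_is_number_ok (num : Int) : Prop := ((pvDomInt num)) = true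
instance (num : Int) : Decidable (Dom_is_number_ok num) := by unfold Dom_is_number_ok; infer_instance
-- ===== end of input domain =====

-- B replaces A's four per-digit substring .find scans with one pass over str(num)
-- testing each character against a fixed forbidden set (objective: simpler).

-- ===== PORT A =====
-- the 'for i in check: if str(num).find(i) != -1: return False' loop of A
def isOkLoopA (num : Int) : List Char → Bool
  | [] => true
  | c :: rest =>
      if PySem.Str.find (PySem.Int.toStr num) (String.ofList [c]) ≠ -1 then false
      else isOkLoopA num rest

def is_number_ok (num : Int) : Bool :=
  if num = 2 ∨ num = 5 then true
  else isOkLoopA num ("0468".toList)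

-- ===== PORT B =====
-- B's 'for ch in str(num): if ch in forbidden: return False' loop
def isOkLoopB : List Char → Bool
  | [] => true
  | c :: rest => if c ∈ ['0', '4', '6', '8'] then false else isOkLoopB rest

def is_number_ok_alt (num : Int) : Bool :=
  if num = 2 ∨ num = 5 then true
  else isOkLoopB (PySem.Int.toStr num).toList

-- ===== PRECONDITION & SPEC =====
def Spec_is_number_ok (num : Int) (out : Bool) : Prop := out = is_number_ok_alt num
instance (num : Int) (out : Bool) : Decidable (Spec_is_number_ok num out) := by unfold Spec_is_number_ok; infer_instance

-- ===== CLAIM (what is proved, stated in full; the proofs are below) =====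
def Claim_equal_is_number_ok : Prop := ∀ (num : Int), Dom_is_number_ok num → Spec_is_number_ok num (is_number_ok num)

-- ===== LEMMAS AND PROOFS =====

theorem singleton_infix_iff_mem {c : Char} {l : List Char} : [c] <:+: l ↔ c ∈ l := by
  constructor
  · intro h
    exact h.sublist.subset (List.mem_singleton_self c)
  · intro h
    obtain ⟨s, t, rfl⟩ := List.append_of_mem h
    exact ⟨s, t, by simp⟩

theorem find_single_iff_mem (num : Int) (c : Char) :
    PySem.Str.find (PySem.Int.toStr num) (String.ofList [c]) ≠ -1 ↔
      c ∈ (PySem.Int.toStr num).toList := by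
  rw [PySem.Str.find_ne_neg_one_iff]
  rw [String.toList_ofList]
  exact singleton_infix_iff_mem

theorem loopA_eq_true_iff (num : Int) (cs : List Char) :
    isOkLoopA num cs = true ↔ ∀ c ∈ cs, c ∉ (PySem.Int.toStr num).toList := by
  induction cs with
  | nil => simp [isOkLoopA]
  | cons c rest ih =>
      simp only [isOkLoopA]
      by_cases hc : c ∈ (PySem.Int.toStr num).toList
      · rw [if_pos ((find_single_iff_mem num c).mpr hc)]
        simp only [Bool.false_eq_true, false_iff]
        intro hall
        exact hall c (List.mem_cons_self) hc
      · rw [if_neg (fun h => hc ((find_single_iff_mem num c).mp h)), ih]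
        constructor
        · intro hall d hd
          rcases List.mem_cons.mp hd with rfl | hd'
          · exact hc
          · exact hall d hd'
        · intro hall d hd
          exact hall d (List.mem_cons_of_mem _ hd)

theorem loopB_eq_true_iff (l : List Char) :
    isOkLoopB l = true ↔ ∀ c ∈ l, c ∉ (['0', '4', '6', '8'] : List Char) := by
  induction l with
  | nil => simp [isOkLoopB]
  | cons c rest ih =>
      simp only [isOkLoopB, List.forall_mem_cons]
      by_cases h : c ∈ (['0', '4', '6', '8'] : List Char)
      · rw [if_pos h]
        simp only [Bool.false_eq_true, false_iff]
        rintro ⟨hc, -⟩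
        exact hc h
      · rw [if_neg h, ih]
        exact ⟨fun hr => ⟨h, hr⟩, fun hr => hr.2⟩

theorem loops_agree (num : Int) :
    isOkLoopA num ("0468".toList) = isOkLoopB (PySem.Int.toStr num).toList := by
  have hs : ("0468".toList : List Char) = ['0', '4', '6', '8'] := by decide
  rw [hs]
  have hA := loopA_eq_true_iff num ['0', '4', '6', '8']
  have hB := loopB_eq_true_iff (PySem.Int.toStr num).toList
  cases ha : isOkLoopA num ['0', '4', '6', '8'] with
  | true =>
      rw [ha] at hA
      symm
      rw [hB]
      intro c hc hmem
      exact hA.mp rfl _ hmem hc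
  | false =>
      cases hb : isOkLoopB (PySem.Int.toStr num).toList with
      | false => rfl
      | true =>
          rw [hb] at hB
          have : isOkLoopA num ['0', '4', '6', '8'] = true := by
            rw [hA]
            intro c hc hmem
            exact hB.mp rfl _ hmem hc
          rw [ha] at this
          exact this

-- ===== VERDICT (by name: the statement is the Claim_ definition above) =====
theorem is_number_ok_spec : Claim_equal_is_number_ok := by
  intro num _
  unfold Spec_is_number_ok is_number_ok is_number_ok_alt
  by_cases h : num = 2 ∨ num = 5
  · simp [h]
  · simp only [h, if_false]
    exact loops_agree num
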